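-- pv_equiv track=rewrite | github.com/binSmile/python-training | Yandex tasks from Habr/Task 3. join.py | slow_solution
-- ===== SOURCE A (Python) =====
-- def slow_solution(t1,t2,OPERATION):
--     res_table = [[],[],[]]
--     checkI = {}
--
--
--     match_right = [0]*len(t2[0])
--     for a1 in range(len(t1[0])):
--         match = 0
--         for a2 in range(len(t2[0])):
--             if t1[0][a1] == t2[0][a2]:
--                 res_table[0].append(t1[0][a1])
--                 res_table[1].append(t1[1][a1])
--                 res_table[2].append(t2[1][a1])
--                 match += 1
--                 match_right[a2] += 1
--
--         if not match and OPERATION in ('LEFT','FULL'):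
--             res_table[0].append(t1[0][a1])
--             res_table[1].append(t1[1][a1])
--             res_table[2].append('NULL')
--     if OPERATION in ('RIGHT','FULL'):
--         for a2 in range(len(t2[0])):
--             if match_right[a2] == 0:
--                 res_table[0].append(t2[0][a2])
--                 res_table[1].append('NULL')
--                 res_table[2].append(t2[1][a2])
--
--     # return res_table
--     return len(res_table[0])
-- ===== SOURCE B (Python) =====
-- def slow_solution(t1, t2, OPERATION):
--     left_keys = t1[0]
--     right_keys = t2[0]
--     right_cnt = {}
--     for k in right_keys:
--         right_cnt[k] = right_cnt.get(k, 0) + 1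
--     total = 0
--     for k in left_keys:
--         c = right_cnt.get(k, 0)
--         if c:
--             total += c
--         elif OPERATION in ('LEFT', 'FULL'):
--             total += 1
--     if OPERATION in ('RIGHT', 'FULL'):
--         left_set = set(left_keys)
--         for k in right_keys:
--             if k not in left_set:
--                 total += 1
--     return total
-- ===== Notes on version B (the rewrite author's own statement) =====
-- stated objective: faster
-- what changed: Replaces A's nested scan of the right key row for every left key (plus a match_right array re-scanned at the end) by a frequency dictionary of right keys and a set of left keys built once, summing per-key match counts and unmatched counts directly.
import Mathlib
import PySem

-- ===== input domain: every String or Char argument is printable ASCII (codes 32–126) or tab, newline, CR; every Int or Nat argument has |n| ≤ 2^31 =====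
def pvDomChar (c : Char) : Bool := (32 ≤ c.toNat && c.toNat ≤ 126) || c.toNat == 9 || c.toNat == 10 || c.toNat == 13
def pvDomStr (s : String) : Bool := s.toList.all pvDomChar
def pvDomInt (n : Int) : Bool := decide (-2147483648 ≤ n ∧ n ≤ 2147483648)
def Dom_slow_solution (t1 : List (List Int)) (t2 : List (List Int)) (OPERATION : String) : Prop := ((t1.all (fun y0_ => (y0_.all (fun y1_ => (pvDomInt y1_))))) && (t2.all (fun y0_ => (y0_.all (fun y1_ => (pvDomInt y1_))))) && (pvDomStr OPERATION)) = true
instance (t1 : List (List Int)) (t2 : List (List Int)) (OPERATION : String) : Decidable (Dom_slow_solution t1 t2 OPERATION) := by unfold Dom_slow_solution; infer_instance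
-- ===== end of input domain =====

-- B replaces A's nested per-key scan of the right key row by a frequency dictionary of the right
-- keys plus a set of the left keys, built once (objective: faster). Return values are identical on Pre_.
-- Python's heterogeneous result columns (ints and the string 'NULL') are ported as Option Int
-- (none = 'NULL'); only the length of column 0 is returned, so the encoding is exact for the result.

-- ===== PORT A =====
-- inner "for a2 in range(len(t2[0]))" loop body; state = (res0, res1, res2, match, match_right)
def pvInnerStep (t20 : List Int) (k : Int) (row1 row2 : Option Int)
    (s : List Int × List (Option Int) × List (Option Int) × Int × List Int) (a2 : Int) :
    List Int × List (Option Int) × List (Option Int) × Int × List Int :=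
  if PySem.List.pyGetD t20 a2 0 = k then
    (s.1 ++ [k], s.2.1 ++ [row1], s.2.2.1 ++ [row2], s.2.2.2.1 + 1,
     PySem.List.pySetD s.2.2.2.2 a2 (PySem.List.pyGetD s.2.2.2.2 a2 0 + 1))
  else s

-- outer "for a1 in range(len(t1[0]))" loop body; state = (res0, res1, res2, match_right)
def pvOuterStep (t10 t11 t20 t21 : List Int) (OPERATION : String)
    (st : List Int × List (Option Int) × List (Option Int) × List Int) (a1 : Int) :
    List Int × List (Option Int) × List (Option Int) × List Int :=
  let k := PySem.List.pyGetD t10 a1 0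
  let r := (PySem.List.pyRange 0 (t20.length : Int) 1).foldl
      (pvInnerStep t20 k (some (PySem.List.pyGetD t11 a1 0)) (some (PySem.List.pyGetD t21 a1 0)))
      (st.1, st.2.1, st.2.2.1, (0 : Int), st.2.2.2)
  if r.2.2.2.1 = 0 ∧ (OPERATION = "LEFT" ∨ OPERATION = "FULL") then
    (r.1 ++ [k], r.2.1 ++ [some (PySem.List.pyGetD t11 a1 0)], r.2.2.1 ++ [(none : Option Int)], r.2.2.2.2)
  else (r.1, r.2.1, r.2.2.1, r.2.2.2.2)

-- trailing RIGHT/FULL "for a2 in range(len(t2[0]))" loop body over match_right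
def pvRightStep (t20 t21 mr : List Int)
    (st : List Int × List (Option Int) × List (Option Int)) (a2 : Int) :
    List Int × List (Option Int) × List (Option Int) :=
  if PySem.List.pyGetD mr a2 0 = 0 then
    (st.1 ++ [PySem.List.pyGetD t20 a2 0], st.2.1 ++ [(none : Option Int)],
     st.2.2 ++ [some (PySem.List.pyGetD t21 a2 0)])
  else st

def slow_solution (t1 : List (List Int)) (t2 : List (List Int)) (OPERATION : String) : Int :=
  let t10 := t1.getD 0 []
  let t11 := t1.getD 1 []
  let t20 := t2.getD 0 []
  let t21 := t2.getD 1 []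
  let mr0 : List Int := PySem.List.pyRepeat [0] (t20.length : Int)
  let afterLeft := (PySem.List.pyRange 0 (t10.length : Int) 1).foldl
      (pvOuterStep t10 t11 t20 t21 OPERATION) (([] : List Int), ([] : List (Option Int)), ([] : List (Option Int)), mr0)
  let res := if OPERATION = "RIGHT" ∨ OPERATION = "FULL" then
      (PySem.List.pyRange 0 (t20.length : Int) 1).foldl
        (pvRightStep t20 t21 afterLeft.2.2.2) (afterLeft.1, afterLeft.2.1, afterLeft.2.2.1)
    else (afterLeft.1, afterLeft.2.1, afterLeft.2.2.1)
  (res.1.length : Int)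

-- ===== PORT B =====
def slow_solution_alt (t1 : List (List Int)) (t2 : List (List Int)) (OPERATION : String) : Int :=
  let leftKeys := t1.getD 0 []
  let rightKeys := t2.getD 0 []
  let rightCnt := rightKeys.foldl (fun d k => d.insert k (d.getD k 0 + 1)) (PySem.Dict.empty : PySem.Dict Int Int)
  let total := leftKeys.foldl (fun tot k =>
      let c := rightCnt.getD k 0
      if c ≠ 0 then tot + c
      else if OPERATION = "LEFT" ∨ OPERATION = "FULL" then tot + 1
      else tot) 0
  if OPERATION = "RIGHT" ∨ OPERATION = "FULL" then
    let leftSet := PySem.Set.ofList leftKeys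
    rightKeys.foldl (fun tot k => if k ∈ leftSet then tot else tot + 1) total
  else total

-- ===== PRECONDITION & SPEC =====
-- Exactly the inputs on which Python A returns (no IndexError): both tables non-empty and the
-- value rows t1[1]/t2[1] long enough for every index A actually reads (including A's read of
-- t2[1][a1] on a match, and of t2[1][a2] for unmatched right keys under RIGHT/FULL).
def Pre_slow_solution (t1 : List (List Int)) (t2 : List (List Int)) (OPERATION : String) : Prop :=
  t1 ≠ [] ∧ t2 ≠ [] ∧
  (∀ i < (t1.getD 0 []).length,
     ((t1.getD 0 []).getD i 0 ∈ t2.getD 0 [] → i < (t1.getD 1 []).length ∧ i < (t2.getD 1 []).length) ∧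
     ((t1.getD 0 []).getD i 0 ∉ t2.getD 0 [] → (OPERATION = "LEFT" ∨ OPERATION = "FULL") →
        i < (t1.getD 1 []).length)) ∧
  ((OPERATION = "RIGHT" ∨ OPERATION = "FULL") →
     ∀ j < (t2.getD 0 []).length, (t2.getD 0 []).getD j 0 ∉ t1.getD 0 [] → j < (t2.getD 1 []).length)
instance (t1 : List (List Int)) (t2 : List (List Int)) (OPERATION : String) : Decidable (Pre_slow_solution t1 t2 OPERATION) := by unfold Pre_slow_solution; infer_instance

def pvWitness_slow_solution : List (List Int) × List (List Int) × String :=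
  ([[1, 2], [10, 20]], [[2, 3], [30, 40]], "FULL")

def Spec_slow_solution (t1 : List (List Int)) (t2 : List (List Int)) (OPERATION : String) (out : Int) : Prop := out = slow_solution_alt t1 t2 OPERATION
instance (t1 : List (List Int)) (t2 : List (List Int)) (OPERATION : String) (out : Int) : Decidable (Spec_slow_solution t1 t2 OPERATION out) := by unfold Spec_slow_solution; infer_instance

-- ===== CLAIM (what is proved, stated in full; the proofs are below) =====
def Claim_equal_slow_solution : Prop := ∀ (t1 : List (List Int)) (t2 : List (List Int)) (OPERATION : String), Dom_slow_solution t1 t2 OPERATION → Pre_slow_solution t1 t2 OPERATION → Spec_slow_solution t1 t2 OPERATION (slow_solution t1 t2 OPERATION)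

-- ===== LEMMAS AND PROOFS =====
lemma getD_append_len {α : Type} [Inhabited α] (l1 l2 : List α) (d : α) :
    (l1 ++ l2).getD l1.length d = l2.getD 0 d := by
  rcases l2 with _|⟨h,t⟩ <;> simp [List.getD]

lemma inner_eq (t20 : List Int) (k : Int) (r1v r2v : Option Int) :
    ∀ (n : Nat), n ≤ t20.length → ∀ (r0 : List Int) (r1 r2 : List (Option Int)) (m : Int) (f : Int → Int),
    (PySem.List.pyRange 0 (n : Int) 1).foldl (pvInnerStep t20 k r1v r2v) (r0, r1, r2, m, t20.map f)
    = (r0 ++ List.replicate ((t20.take n).count k) k,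
       r1 ++ List.replicate ((t20.take n).count k) r1v,
       r2 ++ List.replicate ((t20.take n).count k) r2v,
       m + ((t20.take n).count k : Int),
       (t20.take n).map (fun y => f y + if y = k then 1 else 0) ++ (t20.drop n).map f) := by
  intro n
  induction n with
  | zero => intro _ r0 r1 r2 m f; simp [PySem.List.pyRange_one_eq_nil]
  | succ n ih =>
    intro hn r0 r1 r2 m f
    have hlt : n < t20.length := by omega
    have hcast : ((n+1 : Nat) : Int) = (n : Int) + 1 := by push_cast; ring
    rw [hcast, PySem.List.pyRange_one_succ_right (by positivity), List.foldl_append,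
        ih (by omega) r0 r1 r2 m f]
    have htake : t20.take (n+1) = t20.take n ++ [t20[n]] := List.take_succ_eq_append_getElem hlt
    have hdrop : t20.drop n = t20[n] :: t20.drop (n+1) := List.drop_eq_getElem_cons hlt
    have hlen : ((t20.take n).map (fun y => f y + if y = k then 1 else 0)).length = n := by
      simp [List.length_take]; omega
    simp only [List.foldl_cons, List.foldl_nil, pvInnerStep]
    have hget : PySem.List.pyGetD t20 (n : Int) 0 = t20[n] := by
      rw [PySem.List.pyGetD_natCast]; exact List.getD_eq_getElem t20 0 hlt
    have hmrget : PySem.List.pyGetD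
        ((t20.take n).map (fun y => f y + if y = k then 1 else 0) ++ (t20.drop n).map f) (n : Int) 0
        = f t20[n] := by
      rw [PySem.List.pyGetD_natCast,
          show ((t20.take n).map (fun y => f y + if y = k then 1 else 0) ++ (t20.drop n).map f).getD n 0
             = ((t20.take n).map (fun y => f y + if y = k then 1 else 0) ++ (t20.drop n).map f).getD
                 ((t20.take n).map (fun y => f y + if y = k then 1 else 0)).length 0 by rw [hlen],
          getD_append_len, hdrop]
      simp [List.getD, List.getElem?_eq_getElem hlt]
    by_cases hk : t20[n] = k
    · simp only [hget, hmrget, if_pos hk]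
      rw [PySem.List.pySetD_natCast,
          List.set_append_right _ _ (by omega)]
      rw [hlen, Nat.sub_self, hdrop, htake]
      simp [List.count_append, hk, List.replicate_succ']
      ring
    · simp only [hget, hmrget, if_neg hk]
      have hcount : (t20.take (n+1)).count k = (t20.take n).count k := by
        rw [htake, List.count_append, List.count_singleton']; simp [hk]
      have hmr : (t20.take (n+1)).map (fun y => f y + if y = k then 1 else 0) ++ (t20.drop (n+1)).map f
          = (t20.take n).map (fun y => f y + if y = k then 1 else 0) ++ (t20.drop n).map f := by
        rw [htake, hdrop]; simp only [List.map_append, List.map_cons, List.map_nil, if_neg hk, add_zero, List.append_assoc, List.singleton_append]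
      rw [hcount, hmr]

-- the number of result rows one left key k contributes
def pvW (t20 : List Int) (left : Prop) [Decidable left] (k : Int) : Nat :=
  if t20.count k ≠ 0 then t20.count k else if left then 1 else 0

lemma outer_eq (t10 t11 t20 t21 : List Int) (OPERATION : String) :
    ∀ (n : Nat), n ≤ t10.length →
    ∃ r1 r2, (PySem.List.pyRange 0 (n : Int) 1).foldl (pvOuterStep t10 t11 t20 t21 OPERATION)
        (([] : List Int), ([] : List (Option Int)), ([] : List (Option Int)), t20.map (fun _ => (0 : Int)))
      = (((t10.take n).flatMap fun k =>
            List.replicate (pvW t20 (OPERATION = "LEFT" ∨ OPERATION = "FULL") k) k), r1, r2,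
         t20.map fun y => ((t10.take n).count y : Int)) := by
  intro n
  induction n with
  | zero => intro _; exact ⟨[], [], by simp [PySem.List.pyRange_one_eq_nil]⟩
  | succ n ih =>
    intro hn
    have hlt : n < t10.length := by omega
    obtain ⟨r1, r2, hih⟩ := ih (by omega)
    have hcast : ((n+1 : Nat) : Int) = (n : Int) + 1 := by push_cast; ring
    rw [hcast, PySem.List.pyRange_one_succ_right (by positivity), List.foldl_append, hih]
    have hget : PySem.List.pyGetD t10 (n : Int) 0 = t10[n] := by
      rw [PySem.List.pyGetD_natCast]; exact List.getD_eq_getElem t10 0 hlt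
    have htake : t10.take (n+1) = t10.take n ++ [t10[n]] := List.take_succ_eq_append_getElem hlt
    have hinner := inner_eq t20 (PySem.List.pyGetD t10 (n : Int) 0)
      (some (PySem.List.pyGetD t11 (n : Int) 0)) (some (PySem.List.pyGetD t21 (n : Int) 0))
      t20.length le_rfl
      ((t10.take n).flatMap fun k =>
        List.replicate (pvW t20 (OPERATION = "LEFT" ∨ OPERATION = "FULL") k) k)
      r1 r2 0 (fun y => ((t10.take n).count y : Int))
    have hmrnew : (t20.map fun y => ((t10.take n).count y : Int) + if y = t10[n] then 1 else 0)
        = t20.map fun y => ((t10.take (n+1)).count y : Int) := by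
      apply List.map_congr_left; intro y _
      rw [htake, List.count_append, List.count_singleton']
      by_cases hy : t10[n] = y
      · simp [hy]
      · have hy2 : ¬ y = t10[n] := fun h => hy h.symm
        simp [hy, hy2]
    simp only [List.foldl_cons, List.foldl_nil, pvOuterStep, hget] at *
    rw [hinner]
    simp only [List.take_length, List.drop_length, List.map_nil, List.append_nil, zero_add]
    rw [hmrnew]
    by_cases hc : t20.count t10[n] = 0
    · by_cases hL : OPERATION = "LEFT" ∨ OPERATION = "FULL"
      · refine ⟨r1 ++ List.replicate (t20.count t10[n]) (some (PySem.List.pyGetD t11 (n:Int) 0)) ++ [some (PySem.List.pyGetD t11 (n:Int) 0)],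
                r2 ++ List.replicate (t20.count t10[n]) (some (PySem.List.pyGetD t21 (n:Int) 0)) ++ [(none : Option Int)], ?_⟩
        rw [if_pos ⟨by simp [hc], hL⟩]
        have hw : pvW t20 (OPERATION = "LEFT" ∨ OPERATION = "FULL") t10[n] = 1 := by
          simp [pvW, hc, hL]
        rw [htake, List.flatMap_append]
        simp [hw, hc]
      · refine ⟨r1 ++ List.replicate (t20.count t10[n]) (some (PySem.List.pyGetD t11 (n:Int) 0)),
                r2 ++ List.replicate (t20.count t10[n]) (some (PySem.List.pyGetD t21 (n:Int) 0)), ?_⟩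
        rw [if_neg (by intro h; exact hL h.2)]
        have hw : pvW t20 (OPERATION = "LEFT" ∨ OPERATION = "FULL") t10[n] = 0 := by
          simp [pvW, hc, hL]
        rw [htake, List.flatMap_append]
        simp [hw, hc]
    · refine ⟨r1 ++ List.replicate (t20.count t10[n]) (some (PySem.List.pyGetD t11 (n:Int) 0)),
              r2 ++ List.replicate (t20.count t10[n]) (some (PySem.List.pyGetD t21 (n:Int) 0)), ?_⟩
      rw [if_neg (by intro h; exact hc (by exact_mod_cast h.1))]
      have hw : pvW t20 (OPERATION = "LEFT" ∨ OPERATION = "FULL") t10[n] = t20.count t10[n] := by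
        simp [pvW, hc]
      rw [htake, List.flatMap_append]
      simp [hw]

lemma right_len (t20 t21 : List Int) (c : Int → Int) :
    ∀ (n : Nat), n ≤ t20.length → ∀ (st : List Int × List (Option Int) × List (Option Int)),
    ((PySem.List.pyRange 0 (n : Int) 1).foldl (pvRightStep t20 t21 (t20.map c)) st).1.length
      = st.1.length + (t20.take n).countP (fun y => c y == 0) := by
  intro n
  induction n with
  | zero => intro _ st; simp [PySem.List.pyRange_one_eq_nil]
  | succ n ih =>
    intro hn st
    have hlt : n < t20.length := by omega
    have hcast : ((n+1 : Nat) : Int) = (n : Int) + 1 := by push_cast; ring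
    rw [hcast, PySem.List.pyRange_one_succ_right (by positivity), List.foldl_append]
    have htake : t20.take (n+1) = t20.take n ++ [t20[n]] := List.take_succ_eq_append_getElem hlt
    have hget : PySem.List.pyGetD (t20.map c) (n : Int) 0 = c t20[n] := by
      rw [PySem.List.pyGetD_natCast]
      have : n < (t20.map c).length := by simpa using hlt
      rw [List.getD_eq_getElem _ 0 this]; simp
    simp only [List.foldl_cons, List.foldl_nil, pvRightStep, hget]
    rw [htake, List.countP_append]
    by_cases hz : c t20[n] = 0
    · rw [if_pos hz]; simp [ih (by omega) st, hz]; omega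
    · rw [if_neg hz]; simp [ih (by omega) st, hz]

lemma alt_left_fold (rightCnt : PySem.Dict Int Int) (left : Prop) [Decidable left] :
    ∀ (l : List Int) (t : Int),
    l.foldl (fun tot k =>
        let c := rightCnt.getD k 0
        if c ≠ 0 then tot + c else if left then tot + 1 else tot) t
      = t + (l.map fun k =>
          if rightCnt.getD k 0 ≠ 0 then rightCnt.getD k 0 else if left then 1 else 0).sum := by
  intro l
  induction l with
  | nil => intro t; simp
  | cons h tl ih =>
    intro t
    simp only [List.foldl_cons, List.map_cons, List.sum_cons, ih]
    split_ifs <;> ring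

lemma alt_right_fold (ls : PySem.Set Int) :
    ∀ (l : List Int) (t : Int),
    l.foldl (fun tot k => if k ∈ ls then tot else tot + 1) t
      = t + (l.countP fun k => !(decide (k ∈ ls))) := by
  intro l
  induction l with
  | nil => intro t; simp
  | cons h tl ih =>
    intro t
    simp only [List.foldl_cons]
    by_cases hm : h ∈ ls
    · rw [if_pos hm, ih]; simp [hm]
    · rw [if_neg hm, ih]; simp [hm]; ring

lemma cast_sum_w (l : List Int) (g : Int → Nat) :
    (((l.map g).sum : Nat) : Int) = (l.map fun k => ((g k : Nat) : Int)).sum := by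
  induction l with
  | nil => simp
  | cons h t ih => simp [ih]

-- the two ports agree on every input (the precondition is only needed for A's Python to return at all)
theorem ports_eq (t1 : List (List Int)) (t2 : List (List Int)) (OPERATION : String) :
    slow_solution t1 t2 OPERATION = slow_solution_alt t1 t2 OPERATION := by
  unfold slow_solution slow_solution_alt
  simp only []
  set t10 := t1.getD 0 [] with ht10
  set t11 := t1.getD 1 [] with ht11
  set t20 := t2.getD 0 [] with ht20
  set t21 := t2.getD 1 [] with ht21
  have hmr0 : PySem.List.pyRepeat ([0] : List Int) (t20.length : Int) = t20.map (fun _ => (0 : Int)) := by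
    rw [PySem.List.pyRepeat_singleton]
    simp [List.map_const']
  obtain ⟨r1, r2, hout⟩ := outer_eq t10 t11 t20 t21 OPERATION t10.length le_rfl
  rw [List.take_length] at hout
  rw [hmr0, hout]
  have hR0len : ((t10.flatMap fun k =>
      List.replicate (pvW t20 (OPERATION = "LEFT" ∨ OPERATION = "FULL") k) k).length : Int)
      = ((t10.map (pvW t20 (OPERATION = "LEFT" ∨ OPERATION = "FULL"))).sum : Int) := by
    rw [List.length_flatMap]
    congr 1
    simp
  have hcnt : ∀ k, ((t20.foldl (fun d k => d.insert k (d.getD k 0 + 1)) (PySem.Dict.empty : PySem.Dict Int Int)).getD k 0) = (t20.count k : Int) := by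
    intro k
    rw [PySem.Dict.getD_foldl_insert_add_one]
    simp [PySem.Dict.empty, PySem.Dict.getD, PySem.Dict.get?]
  have hsum : ((t10.map (pvW t20 (OPERATION = "LEFT" ∨ OPERATION = "FULL"))).sum : Int)
      = (t10.map fun k =>
          if ((t20.foldl (fun d k => d.insert k (d.getD k 0 + 1)) (PySem.Dict.empty : PySem.Dict Int Int)).getD k 0) ≠ 0
          then ((t20.foldl (fun d k => d.insert k (d.getD k 0 + 1)) (PySem.Dict.empty : PySem.Dict Int Int)).getD k 0)
          else if OPERATION = "LEFT" ∨ OPERATION = "FULL" then 1 else 0).sum := by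
    rw [cast_sum_w]
    apply congrArg
    apply List.map_congr_left
    intro k _
    simp only [hcnt k, pvW]
    by_cases hc : t20.count k = 0 <;> simp [hc]
  have hcountP : t20.countP (fun y => ((t10.count y : Int)) == 0)
      = t20.countP (fun k => !(decide (k ∈ PySem.Set.ofList t10))) := by
    apply List.countP_congr
    intro y _
    by_cases hy : y ∈ t10
    · have : t10.count y ≠ 0 := by simp [List.count_eq_zero]; exact hy
      simp [hy, PySem.Set.mem_ofList, this]
    · have : t10.count y = 0 := by simp [List.count_eq_zero]; exact hy
      simp [hy, PySem.Set.mem_ofList, this]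
  by_cases hR : OPERATION = "RIGHT" ∨ OPERATION = "FULL"
  · rw [if_pos hR, if_pos hR]
    rw [right_len t20 t21 (fun y => ((t10.count y : Int))) t20.length le_rfl _]
    rw [List.take_length]
    rw [alt_right_fold, alt_left_fold, hcountP, ← hsum, ← hR0len]
    push_cast
    ring
  · rw [if_neg hR, if_neg hR]
    rw [alt_left_fold]
    rw [← hsum, ← hR0len]
    simp

-- ===== VERDICT (by name: the statement is the Claim_ definition above) =====
theorem slow_solution_spec : Claim_equal_slow_solution := by
  intro t1 t2 OPERATION _ _
  unfold Spec_slow_solution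
  exact ports_eq t1 t2 OPERATION
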